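-- pv_equiv track=rewrite | github.com/ASSERT-KTH/Mokav | experiments/pynguin/c4b/return-lst/generated_tests/src_237/6/src_237.py | func
-- ===== SOURCE A (Python) =====
-- def func(*args):
-- 	ret_values = []
--
-- 	import math
-- 	n = int(args[0])
-- 	ans = 0
-- 	for x in range(1, n):
-- 	    ans += (x * (n - x))
-- 	ans += n
-- 	ret_values.append(ans)
--
-- 	return ret_values
-- ===== SOURCE B (Python) =====
-- def func(*args):
--     n = int(args[0])
--     tri = (n * n * n - n) // 6 if n > 1 else 0
--     return [tri + n]
-- ===== Notes on version B (the rewrite author's own statement) =====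
-- stated objective: faster
-- what changed: replaced the linear summation loop with a closed-form cubic polynomial for the sum of x*(n-x)
import Mathlib
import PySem

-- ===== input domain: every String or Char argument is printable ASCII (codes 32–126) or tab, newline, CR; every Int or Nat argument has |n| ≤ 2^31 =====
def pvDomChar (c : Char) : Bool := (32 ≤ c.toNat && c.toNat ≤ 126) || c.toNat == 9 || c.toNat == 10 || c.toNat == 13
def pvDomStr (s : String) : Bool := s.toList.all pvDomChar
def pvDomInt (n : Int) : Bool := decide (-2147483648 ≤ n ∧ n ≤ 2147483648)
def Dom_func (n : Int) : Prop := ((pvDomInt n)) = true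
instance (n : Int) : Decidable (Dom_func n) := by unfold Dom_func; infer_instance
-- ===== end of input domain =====

-- B replaces A's O(n) summation loop by the closed form (n^3-n)//6 (O(1)).

-- ===== PORT A =====
def func (n : Int) : List Int :=
  let ans := (PySem.List.pyRange 1 n 1).foldl (fun acc x => acc + x * (n - x)) 0
  [ans + n]

-- ===== PORT B =====
def func_alt (n : Int) : List Int :=
  let tri := if n > 1 then PySem.Int.floordiv (n * n * n - n) 6 else 0
  [tri + n]

-- ===== PRECONDITION & SPEC =====
def Spec_func (n : Int) (out : List Int) : Prop := out = func_alt n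
instance (n : Int) (out : List Int) : Decidable (Spec_func n out) := by unfold Spec_func; infer_instance

-- ===== CLAIM (what is proved, stated in full; the proofs are below) =====
def Claim_equal_func : Prop := ∀ (n : Int), Dom_func n → Spec_func n (func n)

-- ===== LEMMAS AND PROOFS =====

lemma loop_sum (n : Int) : ∀ (k : Nat) (a : Int),
    6 * ((PySem.List.pyRange 1 (1 + (k : Int)) 1).foldl (fun acc x => acc + x * (n - x)) a)
      = 6 * a + 3 * n * (k * (k + 1)) - k * (k + 1) * (2 * k + 1) := by
  intro k
  induction k with
  | zero => intro a; simp [PySem.List.pyRange_one_eq_nil]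
  | succ m ih =>
    intro a
    have harg : (1 : Int) + ((m + 1 : Nat) : Int) = (1 + (m : Int)) + 1 := by push_cast; ring
    rw [harg, PySem.List.pyRange_one_succ_right (by omega), List.foldl_append]
    push_cast
    have := ih a
    push_cast at this
    simp only [List.foldl]
    ring_nf
    ring_nf at this
    linarith

-- ===== VERDICT (by name: the statement is the Claim_ definition above) =====
theorem func_spec : Claim_equal_func := by
  intro n _
  unfold Spec_func func func_alt
  by_cases h : n > 1
  · have hk : n = 1 + ((n - 1).toNat : Int) := by omega
    have h6 := loop_sum n (n - 1).toNat 0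
    rw [← hk] at h6
    set s := (PySem.List.pyRange 1 n 1).foldl (fun acc x => acc + x * (n - x)) 0 with hs
    have hkk : ((n - 1).toNat : Int) = n - 1 := by omega
    rw [hkk] at h6
    have hval : 6 * s = n * n * n - n := by ring_nf; ring_nf at h6; linarith
    have : PySem.Int.floordiv (n * n * n - n) 6 = s := by
      rw [← hval, PySem.Int.floordiv]
      exact Int.mul_fdiv_cancel_left s (by norm_num)
    show [s + n] = [(if n > 1 then PySem.Int.floordiv (n * n * n - n) 6 else 0) + n]
    rw [if_pos h, this]
  · have : PySem.List.pyRange 1 n 1 = [] := PySem.List.pyRange_one_eq_nil (by omega)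
    simp [this, h]
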